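-- pv_equiv track=rewrite | github.com/dariadau/str_counters | func_3/code.py | check_index
-- ===== SOURCE A (Python) =====
-- def check_index(input_line="one two one tho three"):
--     words_dict = {}
--     count_lst = ['-1'] * len(input_line.split())
--
--     for idx, word in enumerate(input_line.split()):
--         if word not in words_dict:
--             words_dict[word] = idx
--         else:
--             count_lst[idx] = str(words_dict[word])
--             words_dict[word] = idx
--     return ', '.join(count_lst)
-- ===== SOURCE B (Python) =====
-- def check_index(input_line="one two one tho three"):
--     # no dict: each position looks back for the nearest earlier occurrence
--     words = input_line.split()
--
--     def prev_of(i):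
--         for j in range(i - 1, -1, -1):
--             if words[j] == words[i]:
--                 return str(j)
--         return '-1'
--
--     return ', '.join(prev_of(i) for i in range(len(words)))
-- ===== Notes on version B (the rewrite author's own statement) =====
-- stated objective: alternative
-- what changed: Replaces the dict of last-seen indices threaded through one stateful pass by a direct per-position backward scan for the nearest earlier occurrence (no dict, no mutated result list).
import Mathlib
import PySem

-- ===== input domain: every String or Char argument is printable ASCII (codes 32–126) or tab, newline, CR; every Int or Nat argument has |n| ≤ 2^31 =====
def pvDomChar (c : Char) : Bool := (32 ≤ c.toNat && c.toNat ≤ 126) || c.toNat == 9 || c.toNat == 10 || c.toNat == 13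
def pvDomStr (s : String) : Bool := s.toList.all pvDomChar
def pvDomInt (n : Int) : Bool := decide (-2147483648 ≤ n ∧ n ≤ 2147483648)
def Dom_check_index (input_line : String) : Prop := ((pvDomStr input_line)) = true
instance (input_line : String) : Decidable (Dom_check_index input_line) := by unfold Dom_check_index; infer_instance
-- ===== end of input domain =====

-- B replaces A's stateful pass (dict of last-seen indices + mutated result list) by a per-position backward scan; alternative, not faster.

-- ===== PORT A =====
-- loop body of A: check membership, optionally set count_lst[idx], always update the dict
def stepA (st : PySem.Dict String Int × List String) (p : Int × String) :
    PySem.Dict String Int × List String :=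
  if st.1.contains p.2 = false then
    (st.1.insert p.2 p.1, st.2)
  else
    (st.1.insert p.2 p.1, PySem.List.pySetD st.2 p.1 (PySem.Int.toStr (st.1.getD p.2 0)))

def check_index (input_line : String) : String :=
  let words := PySem.Str.split₀ input_line
  let st := (PySem.List.enumerate words 0).foldl stepA
      (PySem.Dict.empty, List.replicate words.length "-1")
  PySem.Str.join ", " st.2

-- ===== PORT B =====
-- B's inner loop: for j in range(i-1, -1, -1): return str(j) on first match, else '-1'
def prevOfB (words : List String) (i : Int) : String :=
  match (PySem.List.pyRange (i - 1) (-1) (-1)).find?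
      (fun j => PySem.List.pyGetD words j "" == PySem.List.pyGetD words i "") with
  | some j => PySem.Int.toStr j
  | none => "-1"

def check_index_alt (input_line : String) : String :=
  let words := PySem.Str.split₀ input_line
  PySem.Str.join ", " ((PySem.List.pyRange 0 (words.length : Int) 1).map (fun i => prevOfB words i))

-- ===== PRECONDITION & SPEC =====
def Spec_check_index (input_line : String) (out : String) : Prop := out = check_index_alt input_line
instance (input_line : String) (out : String) : Decidable (Spec_check_index input_line out) := by unfold Spec_check_index; infer_instance

-- ===== CLAIM (what is proved, stated in full; the proofs are below) =====
def Claim_equal_check_index : Prop := ∀ (input_line : String), Dom_check_index input_line → Spec_check_index input_line (check_index input_line)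

-- ===== LEMMAS AND PROOFS =====

-- index of the last occurrence of w in pref (none if absent)
def lastIdx? (pref : List String) (w : String) : Option Nat :=
  ((List.range pref.length).filter (fun j => pref.getD j "" == w)).getLast?

theorem lastIdx?_nil (w : String) : lastIdx? [] w = none := rfl

theorem lastIdx?_append_singleton (pref : List String) (x w : String) :
    lastIdx? (pref ++ [x]) w =
      if x = w then some pref.length else lastIdx? pref w := by
  unfold lastIdx?
  rw [List.length_append, List.length_singleton, List.range_succ, List.filter_append]
  have hcongr : (List.range pref.length).filter
        (fun j => (pref ++ [x]).getD j "" == w)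
      = (List.range pref.length).filter (fun j => pref.getD j "" == w) := by
    apply List.filter_congr
    intro j hj
    rw [List.mem_range] at hj
    simp [List.getD_eq_getElem?_getD, List.getElem?_append_left hj]
  rw [hcongr, List.filter_singleton]
  have hx : (pref ++ [x]).getD pref.length "" = x := by
    simp [List.getD_eq_getElem?_getD]
  by_cases h : x = w
  · subst h
    rw [hx, if_pos rfl]
    simp
  · have hbe : (x == w) = false := beq_false_of_ne h
    rw [hx, hbe, if_neg h]
    simp

theorem find?_eq_head?_filter {α : Type} (p : α → Bool) (m : List α) :
    m.find? p = (m.filter p).head? := by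
  induction m with
  | nil => rfl
  | cons a t ih =>
    cases h : p a with
    | true => rw [List.find?_cons_of_pos h, List.filter_cons_of_pos h, List.head?_cons]
    | false => rw [List.find?_cons_of_neg (by simp [h]), List.filter_cons_of_neg (by simp [h]), ih]

theorem find?_reverse {α : Type} (p : α → Bool) (l : List α) :
    l.reverse.find? p = (l.filter p).getLast? := by
  rw [find?_eq_head?_filter, List.filter_reverse, List.head?_reverse]

-- B's backward scan finds the last earlier occurrence
theorem prevOfB_eq (ws : List String) (k : Nat) (hk : k < ws.length) :
    prevOfB ws (k : Int) =
      match lastIdx? (ws.take k) (ws.getD k "") with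
      | some j => PySem.Int.toStr (j : Int)
      | none => "-1" := by
  unfold prevOfB
  have hr : PySem.List.pyRange ((k : Int) - 1) (-1) (-1)
      = ((List.range k).map (fun j : Nat => (j : Int))).reverse := by
    rw [PySem.List.pyRange_neg_one_eq_reverse]
    have h1 : (-1 : Int) + 1 = 0 := by ring
    have h2 : ((k : Int) - 1) + 1 = (k : Int) := by ring
    rw [h1, h2, PySem.List.pyRange_zero_natCast]
  rw [hr, find?_reverse, List.filter_map, List.getLast?_map]
  have hp : ∀ j ∈ List.range k,
      ((fun j => PySem.List.pyGetD ws j "" == PySem.List.pyGetD ws (k : Int) "") ∘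
        (fun j : Nat => (j : Int))) j
        = ((ws.take k).getD j "" == ws.getD k "") := by
    intro j hj
    rw [List.mem_range] at hj
    simp only [Function.comp, PySem.List.pyGetD_natCast]
    congr 1
    rw [List.getD_eq_getElem?_getD, List.getD_eq_getElem?_getD, List.getElem?_take_of_lt hj]
  rw [List.filter_congr hp]
  unfold lastIdx?
  rw [List.length_take, Nat.min_eq_left (Nat.le_of_lt hk)]
  cases ((List.range k).filter (fun j => (ws.take k).getD j "" == ws.getD k "")).getLast? <;> rfl

-- setting one cell, read through getD
theorem getD_set_ne (lst : List String) (n i : Nat) (v : String) (h : n ≠ i) :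
    (lst.set n v).getD i "" = lst.getD i "" := by
  rw [List.getD_eq_getElem?_getD, List.getD_eq_getElem?_getD, List.getElem?_set_ne h]

theorem getD_set_self (lst : List String) (n : Nat) (v : String) (h : n < lst.length) :
    (lst.set n v).getD n "" = v := by
  rw [List.getD_eq_getElem?_getD, List.getElem?_set_self h]
  rfl

-- length of the list component is preserved by A's fold
theorem foldA_length (suffix : List (Int × String)) :
    ∀ (d : PySem.Dict String Int) (lst : List String),
      ((suffix.foldl stepA (d, lst)).2).length = lst.length := by
  induction suffix with
  | nil => intro d lst; rfl
  | cons p rest ih =>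
    intro d lst
    rw [List.foldl_cons]
    cases h : d.contains p.2 with
    | false =>
      rw [show stepA (d, lst) p = (d.insert p.2 p.1, lst) by simp [stepA, h]]
      exact ih _ _
    | true =>
      rw [show stepA (d, lst) p =
          (d.insert p.2 p.1, PySem.List.pySetD lst p.1 (PySem.Int.toStr (d.getD p.2 0))) by
        simp [stepA, h]]
      rw [ih, PySem.List.length_pySetD]

-- the list component of A's fold, pointwise: first occurrences keep the initial cell,
-- repeated words get the stringified index of the previous occurrence
theorem getD_set_oob (lst : List String) (n i : Nat) (v : String) (hi : lst.length ≤ i) :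
    (lst.set n v).getD i "" = lst.getD i "" := by
  rcases eq_or_ne n i with h | h
  · subst h
    rw [List.getD_eq_getElem?_getD, List.getD_eq_getElem?_getD, List.getElem?_set,
        if_pos rfl, if_neg (by omega), List.getElem?_eq_none hi]
  · exact getD_set_ne lst n i v h

-- the list component of A's fold, pointwise: first occurrences keep the initial cell,
-- repeated words get the stringified index of the previous occurrence
theorem foldA_getD (suffix : List String) :
    ∀ (pref lst : List String) (d : PySem.Dict String Int),
      (∀ w, d.get? w = (lastIdx? pref w).map (fun j : Nat => (j : Int))) →
      ∀ i : Nat,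
        ((PySem.List.enumerate suffix (pref.length : Int)).foldl stepA (d, lst)).2.getD i "" =
          if pref.length ≤ i ∧ i < pref.length + suffix.length ∧ i < lst.length then
            match lastIdx? (pref ++ suffix.take (i - pref.length))
                (suffix.getD (i - pref.length) "") with
            | some j => PySem.Int.toStr (j : Int)
            | none => lst.getD i ""
          else lst.getD i "" := by
  induction suffix with
  | nil =>
    intro pref lst d _hd i
    rw [PySem.List.enumerate_nil, List.foldl_nil, if_neg]
    rintro ⟨h1, h2, _⟩
    simp at h2
    omega
  | cons x rest ih =>
    intro pref lst d hd i
    rw [PySem.List.enumerate_cons, List.foldl_cons]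
    have hd' : ∀ w, (d.insert x (pref.length : Int)).get? w =
        (lastIdx? (pref ++ [x]) w).map (fun j : Nat => (j : Int)) := by
      intro w
      rw [PySem.Dict.get?_insert, lastIdx?_append_singleton]
      by_cases hw : w = x
      · subst hw; rw [if_pos rfl, if_pos rfl]; rfl
      · rw [if_neg hw, if_neg (Ne.symm hw), hd w]
    cases hlx : lastIdx? pref x with
    | none =>
      have hstep : stepA (d, lst) ((pref.length : Int), x) = (d.insert x (pref.length : Int), lst) := by
        have hc : d.contains x = false := by
          rw [PySem.Dict.contains_eq_isSome_get?, hd x, hlx]; rfl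
        simp [stepA, hc]
      rw [hstep]
      have hih := ih (pref ++ [x]) lst (d.insert x (pref.length : Int)) hd' i
      simp only [List.length_append, List.length_singleton, Nat.cast_add, Nat.cast_one] at hih
      rw [hih]
      simp only [List.length_cons]
      by_cases hil : i < lst.length
      · by_cases h1 : pref.length ≤ i
        · by_cases h2 : i < pref.length + (rest.length + 1)
          · by_cases heq : i = pref.length
            · subst heq
              rw [if_neg (by omega), if_pos ⟨le_refl _, by omega, hil⟩]
              rw [Nat.sub_self, List.take_zero, List.append_nil, List.getD_cons_zero, hlx]
            · rw [if_pos ⟨by omega, by omega, hil⟩, if_pos ⟨h1, by omega, hil⟩]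
              have hsub : i - pref.length = (i - (pref.length + 1)) + 1 := by omega
              rw [hsub, List.take_succ_cons, List.getD_cons_succ]
              have hap : pref ++ x :: rest.take (i - (pref.length + 1))
                  = (pref ++ [x]) ++ rest.take (i - (pref.length + 1)) := by simp
              rw [hap]
          · rw [if_neg (by omega), if_neg (by omega)]
        · rw [if_neg (by omega), if_neg (by omega)]
      · rw [if_neg (by omega), if_neg (by omega)]
    | some jprev =>
      have hget : d.get? x = some ((jprev : Nat) : Int) := by rw [hd x, hlx]; rfl
      have hstep : stepA (d, lst) ((pref.length : Int), x) =
          (d.insert x (pref.length : Int), lst.set pref.length (PySem.Int.toStr (jprev : Int))) := by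
        have hc : d.contains x = true := by
          rw [PySem.Dict.contains_eq_isSome_get?, hget]; rfl
        have hv : d.getD x 0 = ((jprev : Nat) : Int) := PySem.Dict.getD_of_get?_eq_some d 0 hget
        simp [stepA, hc, hv, PySem.List.pySetD_natCast]
      rw [hstep]
      have hih := ih (pref ++ [x]) (lst.set pref.length (PySem.Int.toStr (jprev : Int)))
        (d.insert x (pref.length : Int)) hd' i
      simp only [List.length_append, List.length_singleton, List.length_set,
        Nat.cast_add, Nat.cast_one] at hih
      rw [hih]
      simp only [List.length_cons]
      by_cases hil : i < lst.length
      · by_cases h1 : pref.length ≤ i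
        · by_cases h2 : i < pref.length + (rest.length + 1)
          · by_cases heq : i = pref.length
            · subst heq
              rw [if_neg (by omega), if_pos ⟨le_refl _, by omega, hil⟩]
              rw [Nat.sub_self, List.take_zero, List.append_nil, List.getD_cons_zero, hlx,
                  getD_set_self lst pref.length _ hil]
            · rw [if_pos ⟨by omega, by omega, hil⟩, if_pos ⟨h1, by omega, hil⟩]
              have hsub : i - pref.length = (i - (pref.length + 1)) + 1 := by omega
              rw [hsub, List.take_succ_cons, List.getD_cons_succ]
              have hap : pref ++ x :: rest.take (i - (pref.length + 1))
                  = (pref ++ [x]) ++ rest.take (i - (pref.length + 1)) := by simp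
              rw [hap, getD_set_ne lst pref.length i _ (by omega)]
          · rw [if_neg (by omega), if_neg (by omega),
                getD_set_ne lst pref.length i _ (by omega)]
        · rw [if_neg (by omega), if_neg (by omega),
              getD_set_ne lst pref.length i _ (by omega)]
      · rw [if_neg (by omega), if_neg (by omega), getD_set_oob lst pref.length i _ (by omega)]

theorem check_index_eq (input_line : String) :
    check_index input_line = check_index_alt input_line := by
  have key : ∀ ws : List String,
      ((PySem.List.enumerate ws 0).foldl stepA
          (PySem.Dict.empty, List.replicate ws.length "-1")).2
        = (PySem.List.pyRange 0 (ws.length : Int) 1).map (fun i => prevOfB ws i) := by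
    intro ws
    have hlen : ((PySem.List.enumerate ws 0).foldl stepA
        (PySem.Dict.empty, List.replicate ws.length "-1")).2.length = ws.length := by
      rw [foldA_length, List.length_replicate]
    apply List.ext_getElem?
    intro i
    by_cases hiw : i < ws.length
    · rw [PySem.List.getElem?_map_pyRange_zero (fun j => prevOfB ws j) _ _ hiw]
      have hA := foldA_getD ws [] (List.replicate ws.length "-1") PySem.Dict.empty
        (fun w => by rw [PySem.Dict.get?_empty, lastIdx?_nil]; rfl) i
      simp only [List.length_nil, Nat.cast_zero, List.nil_append, Nat.sub_zero,
        List.length_replicate] at hA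
      rw [if_pos ⟨Nat.zero_le i, by omega, hiw⟩] at hA
      have hL : ((PySem.List.enumerate ws 0).foldl stepA
          (PySem.Dict.empty, List.replicate ws.length "-1")).2[i]?
          = some (((PySem.List.enumerate ws 0).foldl stepA
            (PySem.Dict.empty, List.replicate ws.length "-1")).2.getD i "") := by
        rw [List.getD_eq_getElem _ "" (by rw [hlen]; exact hiw),
            List.getElem?_eq_getElem (by rw [hlen]; exact hiw)]
      rw [hL, hA, prevOfB_eq ws i hiw, List.getD_replicate _ hiw]
    · rw [List.getElem?_eq_none (by rw [hlen]; omega),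
          List.getElem?_eq_none (by
            rw [List.length_map, PySem.List.length_pyRange_one]; omega)]
  simp only [check_index, check_index_alt]
  rw [key]

-- ===== VERDICT (by name: the statement is the Claim_ definition above) =====
theorem check_index_spec : Claim_equal_check_index := by
  intro input_line _hdom
  unfold Spec_check_index
  exact check_index_eq input_line
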